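-- pv_equiv track=rewrite | github.com/sjy2335/Problem-Solving | 백준/Silver/18111. 마인크래프트/마인크래프트.py | get_time_required
-- ===== SOURCE A (Python) =====
-- def get_time_required(target, ground, B):
--     time = 0
--     for g in ground:
--         for height in g:
--             if target > height:
--                 inserted = target - height
--                 time += inserted
--                 B -= inserted
--             else:
--                 removed = height - target
--                 time += 2 * removed
--                 B += removed
--     return time if B >= 0 else -1
-- ===== SOURCE B (Python) =====
-- def get_time_required(target, ground, B):
--     counts = {}
--     for row in ground:
--         for h in row:
--             counts[h] = counts.get(h, 0) + 1
--     added = 0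
--     removed = 0
--     for h, c in counts.items():
--         if h < target:
--             added += c * (target - h)
--         else:
--             removed += c * (h - target)
--     time = added + 2 * removed
--     return time if B - added + removed >= 0 else -1
-- ===== Notes on version B (the rewrite author's own statement) =====
-- stated objective: alternative
-- what changed: B first builds a height histogram (dict height -> count) of all cells and then accumulates added/removed block totals per distinct height bucket, deriving the time and the budget test arithmetically, instead of A's per-cell running (time, B) accumulator.
import Mathlib
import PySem

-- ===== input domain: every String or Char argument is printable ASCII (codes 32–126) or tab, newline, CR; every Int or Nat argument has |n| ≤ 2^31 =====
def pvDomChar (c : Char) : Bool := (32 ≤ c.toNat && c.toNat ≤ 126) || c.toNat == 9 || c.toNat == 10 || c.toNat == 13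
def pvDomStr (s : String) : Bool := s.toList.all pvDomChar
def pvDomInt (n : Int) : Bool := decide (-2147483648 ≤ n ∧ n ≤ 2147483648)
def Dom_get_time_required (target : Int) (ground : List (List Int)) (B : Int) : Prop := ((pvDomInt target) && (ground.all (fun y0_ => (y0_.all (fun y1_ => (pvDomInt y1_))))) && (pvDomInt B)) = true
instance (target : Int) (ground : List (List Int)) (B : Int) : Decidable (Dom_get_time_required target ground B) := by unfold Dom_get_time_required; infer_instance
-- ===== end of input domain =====

-- B replaces A's per-cell (time, B) accumulator by a height histogram (Dict) folded over
-- per-height buckets; alternative decomposition, same return value (no speed claim).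


-- ===== PORT A =====
def get_time_required (target : Int) (ground : List (List Int)) (B : Int) : Int :=
  let st := ground.foldl (fun (st : Int × Int) g =>
      g.foldl (fun (st : Int × Int) height =>
        if target > height then
          let inserted := target - height
          (st.1 + inserted, st.2 - inserted)
        else
          let removed := height - target
          (st.1 + 2 * removed, st.2 + removed)) st) (0, B)
  if st.2 ≥ 0 then st.1 else -1

-- ===== PORT B =====
def get_time_required_alt (target : Int) (ground : List (List Int)) (B : Int) : Int :=
  let counts : PySem.Dict Int Int := ground.foldl (fun d row =>
      row.foldl (fun d h => d.modify h 0 (· + 1)) d) PySem.Dict.empty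
  let ar : Int × Int := counts.items.foldl (fun (ar : Int × Int) kv =>
      if kv.1 < target then (ar.1 + kv.2 * (target - kv.1), ar.2)
      else (ar.1, ar.2 + kv.2 * (kv.1 - target))) (0, 0)
  let time := ar.1 + 2 * ar.2
  if B - ar.1 + ar.2 ≥ 0 then time else -1

-- ===== PRECONDITION & SPEC =====
def Spec_get_time_required (target : Int) (ground : List (List Int)) (B : Int) (out : Int) : Prop := out = get_time_required_alt target ground B
instance (target : Int) (ground : List (List Int)) (B : Int) (out : Int) : Decidable (Spec_get_time_required target ground B out) := by unfold Spec_get_time_required; infer_instance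

-- ===== CLAIM (what is proved, stated in full; the proofs are below) =====
def Claim_equal_get_time_required : Prop := ∀ (target : Int) (ground : List (List Int)) (B : Int), Dom_get_time_required target ground B → Spec_get_time_required target ground B (get_time_required target ground B)

-- ===== LEMMAS AND PROOFS =====

-- the per-cell added cost (target above the cell) and removed cost (cell at/above target)
def pvAdd (target h : Int) : Int := if h < target then target - h else 0
def pvRem (target h : Int) : Int := if h < target then 0 else h - target

-- A's double fold equals the fold over the flattened cells, characterised by the two sums
theorem A_foldl_char (target : Int) (l : List Int) (t0 b0 : Int) :
    l.foldl (fun (st : Int × Int) height =>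
        if target > height then
          (st.1 + (target - height), st.2 - (target - height))
        else
          (st.1 + 2 * (height - target), st.2 + (height - target))) (t0, b0)
      = (t0 + ((l.map (fun h => pvAdd target h + 2 * pvRem target h)).sum),
         b0 + ((l.map (fun h => pvRem target h - pvAdd target h)).sum)) := by
  induction l generalizing t0 b0 with
  | nil => simp
  | cons x t ih =>
    simp only [List.foldl_cons, List.map_cons, List.sum_cons]
    by_cases hx : target > x
    · rw [if_pos hx, ih]
      simp [pvAdd, pvRem, hx]
      constructor <;> first | trivial | ring
    · rw [if_neg hx, ih]
      have hx' : ¬ x < target := by omega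
      simp [pvAdd, pvRem, hx']
      constructor <;> first | trivial | ring

-- B's fold over the histogram items, characterised by two sums over the items
theorem B_foldl_char (target : Int) (l : List (Int × Int)) (a0 r0 : Int) :
    l.foldl (fun (ar : Int × Int) kv =>
        if kv.1 < target then (ar.1 + kv.2 * (target - kv.1), ar.2)
        else (ar.1, ar.2 + kv.2 * (kv.1 - target))) (a0, r0)
      = (a0 + ((l.map (fun kv => kv.2 * pvAdd target kv.1)).sum),
         r0 + ((l.map (fun kv => kv.2 * pvRem target kv.1)).sum)) := by
  induction l generalizing a0 r0 with
  | nil => simp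
  | cons x t ih =>
    simp only [List.foldl_cons, List.map_cons, List.sum_cons]
    by_cases hx : x.1 < target
    · rw [if_pos hx, ih]
      simp [pvAdd, pvRem, hx]
      ring
    · rw [if_neg hx, ih]
      simp [pvAdd, pvRem, hx]
      ring

theorem sum_map_ite_self (S : List Int) (g : Int → Int) (x : Int)
    (hnd : S.Nodup) (hx : x ∈ S) :
    (S.map (fun k => if x = k then g k else 0)).sum = g x := by
  induction S with
  | nil => cases hx
  | cons y t ih =>
    simp only [List.map_cons, List.sum_cons]
    rcases List.mem_cons.mp hx with h | h
    · subst h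
      have : ∀ k ∈ t, (if x = k then g k else 0) = 0 := by
        intro k hk
        have : x ≠ k := fun he => (List.nodup_cons.mp hnd).1 (he ▸ hk)
        simp [this]
      rw [if_pos rfl, List.sum_eq_zero (by
        intro z hz
        rcases List.mem_map.mp hz with ⟨k, hk, rfl⟩
        exact this k hk)]
      ring
    · have hne : x ≠ y := fun he => (List.nodup_cons.mp hnd).1 (he ▸ h)
      rw [if_neg hne, ih (List.nodup_cons.mp hnd).2 h]
      ring

-- summing count·g over a nodup list of keys covering l equals summing g over l
theorem sum_count_mul (S l : List Int) (g : Int → Int)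
    (hnd : S.Nodup) (hmem : ∀ x ∈ l, x ∈ S) :
    (S.map (fun k => (l.count k : Int) * g k)).sum = (l.map g).sum := by
  induction l with
  | nil => simp
  | cons x t ih =>
    have hxS : x ∈ S := hmem x (by simp)
    have ht : ∀ y ∈ t, y ∈ S := fun y hy => hmem y (by simp [hy])
    have hsplit : ∀ k : Int, ((x :: t).count k : Int) * g k
        = (t.count k : Int) * g k + (if x = k then g k else 0) := by
      intro k
      by_cases hk : x = k
      · subst hk; simp; ring
      · simp [hk]
    calc (S.map (fun k => ((x :: t).count k : Int) * g k)).sum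
        = (S.map (fun k => (t.count k : Int) * g k + (if x = k then g k else 0))).sum := by
          apply congrArg; apply List.map_congr_left; intro k _; exact hsplit k
      _ = (S.map (fun k => (t.count k : Int) * g k)).sum
            + (S.map (fun k => if x = k then g k else 0)).sum := by
          rw [← List.sum_map_add]
      _ = (t.map g).sum + g x := by rw [ih ht, sum_map_ite_self S g x hnd hxS]
      _ = ((x :: t).map g).sum := by simp [add_comm]

-- ===== VERDICT (by name: the statement is the Claim_ definition above) =====
theorem get_time_required_spec : Claim_equal_get_time_required := by
  intro target ground B _
  simp only [Spec_get_time_required, get_time_required, get_time_required_alt]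
  rw [← List.foldl_flatten, ← List.foldl_flatten, ← PySem.Dict.counter_eq_foldl,
    PySem.Dict.items_counter]
  simp only [A_foldl_char, B_foldl_char]
  set cells := ground.flatten with hcells
  set S := PySem.Set.ofList cells with hS
  have hnd : S.Nodup := PySem.Set.nodup_ofList cells
  have hmem : ∀ x ∈ cells, x ∈ S := fun x hx => (PySem.Set.mem_ofList cells x).mpr hx
  have hmap : ∀ (g : Int → Int),
      ((S.map (fun k => (k, (cells.count k : Int)))).map
        (fun kv : Int × Int => kv.2 * g kv.1)).sum = (cells.map g).sum := by
    intro g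
    rw [List.map_map]
    have : ((fun kv : Int × Int => kv.2 * g kv.1) ∘ fun k => (k, (cells.count k : Int)))
        = fun k => (cells.count k : Int) * g k := rfl
    rw [this, sum_count_mul S cells g hnd hmem]
  rw [hmap (fun h => pvAdd target h), hmap (fun h => pvRem target h)]
  have hsum : (cells.map (fun h => pvAdd target h + 2 * pvRem target h)).sum
      = (cells.map (fun h => pvAdd target h)).sum + 2 * (cells.map (fun h => pvRem target h)).sum := by
    induction cells with
    | nil => simp
    | cons x t ih => simp only [List.map_cons, List.sum_cons, ih]; ring
  have hsum2 : (cells.map (fun h => pvRem target h - pvAdd target h)).sum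
      = (cells.map (fun h => pvRem target h)).sum - (cells.map (fun h => pvAdd target h)).sum := by
    induction cells with
    | nil => simp
    | cons x t ih => simp only [List.map_cons, List.sum_cons, ih]; ring
  rw [hsum, hsum2]
  set ad := (cells.map (fun h => pvAdd target h)).sum
  set rm := (cells.map (fun h => pvRem target h)).sum
  clear_value ad rm
  split_ifs <;> omega
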